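-- pv_equiv track=rewrite | github.com/prateekdesh/linux-driver-analyzer | script.py | parse_quantitative_score
-- ===== SOURCE A (Python) =====
-- def parse_quantitative_score(cppcheck_results):
--     severity_weights = {
--         'error': 10,
--         'warning': 5,
--         'style': 2,
--         'performance': 3,
--         'portability': 2,
--         'information': 1
--     }
--
--     total_penalty = 0
--
--     if not cppcheck_results or 'errors' not in cppcheck_results:
--         return 100
--
--     for error in cppcheck_results['errors']:
--         severity = error.get('severity', 'unknown')
--
--         if error.get('id') in ['checkersReport', 'missingIncludeSystem']:
--             continue
--
--         weight = severity_weights.get(severity, 1)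
--         total_penalty += weight
--
--     return max(0, 100 - total_penalty)
-- ===== SOURCE B (Python) =====
-- def parse_quantitative_score(cppcheck_results):
--     if not cppcheck_results or 'errors' not in cppcheck_results:
--         return 100
--     weights = {
--         'error': 10,
--         'warning': 5,
--         'style': 2,
--         'performance': 3,
--         'portability': 2,
--         'information': 1
--     }
--     counts = {}
--     for error in cppcheck_results['errors']:
--         if error.get('id') in ('checkersReport', 'missingIncludeSystem'):
--             continue
--         sev = error.get('severity', 'unknown')
--         counts[sev] = counts.get(sev, 0) + 1
--     total_penalty = sum(c * weights.get(sev, 1) for sev, c in counts.items())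
--     return max(0, 100 - total_penalty)
-- ===== Notes on version B (the rewrite author's own statement) =====
-- stated objective: alternative
-- what changed: B builds a frequency table of severities over the kept errors and computes the penalty as a second pass over distinct severities (count x weight), instead of A's per-error running accumulator.
import Mathlib
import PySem

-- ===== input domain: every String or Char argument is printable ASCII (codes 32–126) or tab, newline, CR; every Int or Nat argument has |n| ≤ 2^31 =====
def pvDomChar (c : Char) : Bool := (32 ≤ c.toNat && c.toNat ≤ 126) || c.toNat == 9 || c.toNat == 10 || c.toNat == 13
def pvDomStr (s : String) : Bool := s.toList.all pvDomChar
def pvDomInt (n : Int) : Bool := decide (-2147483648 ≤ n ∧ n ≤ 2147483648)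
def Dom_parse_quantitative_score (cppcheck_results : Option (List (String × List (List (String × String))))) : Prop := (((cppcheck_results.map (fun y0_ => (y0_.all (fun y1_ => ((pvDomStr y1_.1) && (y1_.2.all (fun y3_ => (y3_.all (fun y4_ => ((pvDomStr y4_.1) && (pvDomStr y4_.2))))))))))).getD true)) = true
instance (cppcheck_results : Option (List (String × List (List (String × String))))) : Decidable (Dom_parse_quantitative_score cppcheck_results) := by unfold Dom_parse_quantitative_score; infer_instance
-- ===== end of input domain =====

-- B replaces A's per-error running penalty accumulator by a severity frequency table summed
-- against the weights in a second pass over distinct severities (objective: alternative).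

-- ===== PORT A =====
def parse_quantitative_score (cppcheck_results : Option (List (String × List (List (String × String))))) : Int :=
  let severity_weights : PySem.Dict String Int :=
    PySem.Dict.mk [("error", 10), ("warning", 5), ("style", 2), ("performance", 3),
                   ("portability", 2), ("information", 1)]
  match cppcheck_results with
  | none => 100
  | some items =>
    if items.isEmpty then 100
    else
      match (PySem.Dict.mk items).get? "errors" with
      | none => 100
      | some errs =>
        let total_penalty := errs.foldl (fun acc e =>
          let ed := PySem.Dict.mk e
          let severity := ed.getD "severity" "unknown"
          if ed.get? "id" == some "checkersReport" || ed.get? "id" == some "missingIncludeSystem"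
          then acc
          else acc + severity_weights.getD severity 1) 0
        max 0 (100 - total_penalty)

-- ===== PORT B =====
def parse_quantitative_score_alt (cppcheck_results : Option (List (String × List (List (String × String))))) : Int :=
  match cppcheck_results with
  | none => 100
  | some items =>
    if items.isEmpty then 100
    else
      match (PySem.Dict.mk items).get? "errors" with
      | none => 100
      | some errs =>
        let weights : PySem.Dict String Int :=
          PySem.Dict.mk [("error", 10), ("warning", 5), ("style", 2), ("performance", 3),
                         ("portability", 2), ("information", 1)]
        let counts := errs.foldl (fun c e =>
          let ed := PySem.Dict.mk e
          if ed.get? "id" == some "checkersReport" || ed.get? "id" == some "missingIncludeSystem"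
          then c
          else
            let sev := ed.getD "severity" "unknown"
            c.insert sev (c.getD sev 0 + 1)) PySem.Dict.empty
        let total_penalty := counts.items.foldl (fun a p => a + p.2 * weights.getD p.1 1) 0
        max 0 (100 - total_penalty)

-- ===== PRECONDITION & SPEC =====
def Spec_parse_quantitative_score (cppcheck_results : Option (List (String × List (List (String × String))))) (out : Int) : Prop := out = parse_quantitative_score_alt cppcheck_results
instance (cppcheck_results : Option (List (String × List (List (String × String))))) (out : Int) : Decidable (Spec_parse_quantitative_score cppcheck_results out) := by unfold Spec_parse_quantitative_score; infer_instance

-- ===== CLAIM (what is proved, stated in full; the proofs are below) =====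
def Claim_equal_parse_quantitative_score : Prop := ∀ (cppcheck_results : Option (List (String × List (List (String × String))))), Dom_parse_quantitative_score cppcheck_results → Spec_parse_quantitative_score cppcheck_results (parse_quantitative_score cppcheck_results)

-- ===== LEMMAS AND PROOFS =====

/-- Whether an error is skipped by both programs. -/
def pvSkip (e : List (String × String)) : Bool :=
  (PySem.Dict.mk e).get? "id" == some "checkersReport" ||
  (PySem.Dict.mk e).get? "id" == some "missingIncludeSystem"

/-- The severity an error contributes. -/
def pvSev (e : List (String × String)) : String :=
  (PySem.Dict.mk e).getD "severity" "unknown"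

def pvW : String → Int := fun s =>
  (PySem.Dict.mk [("error", (10:Int)), ("warning", 5), ("style", 2), ("performance", 3),
                  ("portability", 2), ("information", 1)]).getD s 1

/-- folding `acc + g x` is `acc + sum of map`. -/
theorem pv_foldl_add_map {α : Type} (g : α → Int) :
    ∀ (l : List α) (a : Int), l.foldl (fun acc x => acc + g x) a = a + (l.map g).sum := by
  intro l
  induction l with
  | nil => simp
  | cons x t ih => intro a; simp [List.foldl_cons, ih]; ring

/-- A's loop equals the sum of weights over the kept errors' severities. -/
theorem pvA_loop (errs : List (List (String × String))) :
    errs.foldl (fun acc e =>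
      if (PySem.Dict.mk e).get? "id" == some "checkersReport" ||
         (PySem.Dict.mk e).get? "id" == some "missingIncludeSystem"
      then acc
      else acc + (PySem.Dict.mk [("error", (10:Int)), ("warning", 5), ("style", 2),
          ("performance", 3), ("portability", 2), ("information", 1)]).getD
          ((PySem.Dict.mk e).getD "severity" "unknown") 1) 0
    = ((errs.filter (fun e => !pvSkip e)).map (fun e => pvW (pvSev e))).sum := by
  have hbody : (fun (acc : Int) (e : List (String × String)) =>
      if (PySem.Dict.mk e).get? "id" == some "checkersReport" ||
         (PySem.Dict.mk e).get? "id" == some "missingIncludeSystem"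
      then acc
      else acc + (PySem.Dict.mk [("error", (10:Int)), ("warning", 5), ("style", 2),
          ("performance", 3), ("portability", 2), ("information", 1)]).getD
          ((PySem.Dict.mk e).getD "severity" "unknown") 1)
      = (fun acc e => acc + (if pvSkip e then 0 else pvW (pvSev e))) := by
    funext acc e
    simp only [pvSkip, pvSev, pvW]
    split_ifs <;> simp_all
  rw [hbody, pv_foldl_add_map, zero_add]
  induction errs with
  | nil => rfl
  | cons e t ih =>
    by_cases h : pvSkip e = true <;>
      simp [h, ih]

/-- B's counting loop is the per-severity bump loop over the kept severities. -/
theorem pvB_counts_gen (errs : List (List (String × String))) :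
    ∀ (c : PySem.Dict String Int),
    errs.foldl (fun c e =>
      if (PySem.Dict.mk e).get? "id" == some "checkersReport" ||
         (PySem.Dict.mk e).get? "id" == some "missingIncludeSystem"
      then c
      else c.insert ((PySem.Dict.mk e).getD "severity" "unknown")
             (c.getD ((PySem.Dict.mk e).getD "severity" "unknown") 0 + 1)) c
    = ((errs.filter (fun e => !pvSkip e)).map pvSev).foldl
        (fun c s => c.insert s (c.getD s 0 + 1)) c := by
  induction errs with
  | nil => intro c; rfl
  | cons e t ih =>
    intro c
    simp only [List.foldl_cons, List.filter_cons]
    by_cases h : pvSkip e = true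
    · simp only [pvSkip] at h
      simp only [h, if_true, pvSkip, Bool.not_true, Bool.false_eq_true, if_false]
      exact ih c
    · rw [Bool.not_eq_true] at h
      simp only [pvSkip] at h
      simp only [h, Bool.false_eq_true, if_false, pvSkip, Bool.not_false, if_true,
        List.map_cons, List.foldl_cons, pvSev]
      exact ih _

/-- summing count·weight over the distinct severities equals summing the weights. -/
theorem pv_count_sum (l : List String) :
    ((PySem.Set.ofList l).map (fun k => ((l.count k : Int)) * pvW k)).sum
      = (l.map pvW).sum := by
  rw [Finset.sum_list_map_count l pvW]
  have hfin : (PySem.Set.ofList l).toFinset = l.toFinset := by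
    ext x
    simp [PySem.Set.mem_ofList]
  rw [← List.sum_toFinset _ (PySem.Set.nodup_ofList l), hfin]
  apply Finset.sum_congr rfl
  intro x hx
  simp

-- ===== VERDICT (by name: the statement is the Claim_ definition above) =====
theorem parse_quantitative_score_spec : Claim_equal_parse_quantitative_score := by
  intro r _
  unfold Spec_parse_quantitative_score parse_quantitative_score parse_quantitative_score_alt
  cases r with
  | none => rfl
  | some items =>
    simp only
    split
    · rfl
    · cases hg : (PySem.Dict.mk items).get? "errors" with
      | none => rfl
      | some errs =>
        simp only
        congr 1
        congr 1
        rw [pvA_loop, pvB_counts_gen, PySem.Dict.foldl_insert_getD_add_one_eq_counter,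
          pv_foldl_add_map, zero_add, PySem.Dict.items_counter, List.map_map]
        have hc := pv_count_sum ((errs.filter (fun e => !pvSkip e)).map pvSev)
        rw [List.map_map] at hc
        exact hc.symm
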